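-- pv_equiv track=rewrite | github.com/dayuryu/tokyo-commute-map | scripts/diagnose_data_sources.py | find_station_code
-- ===== SOURCE A (Python) =====
-- def find_station_code(stations: dict, name: str):
--     for code, info in stations.items():
--         if info["name"] == name:
--             return code
--     for code, info in stations.items():
--         if name in info["name"]:
--             return code
--     return None
-- ===== SOURCE B (Python) =====
-- def find_station_code(stations: dict, name: str):
--     candidate = None
--     for code, info in stations.items():
--         station_name = info["name"]
--         if station_name == name:
--             return code
--         if candidate is None and name in station_name:
--             candidate = code
--     return candidate
-- ===== Notes on version B (the rewrite author's own statement) =====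
-- stated objective: alternative
-- what changed: Replaces A's two sequential scans (exact pass, then substring pass) with a single pass that returns immediately on an exact match and records the first substring match as a candidate returned after the loop.
import Mathlib
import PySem

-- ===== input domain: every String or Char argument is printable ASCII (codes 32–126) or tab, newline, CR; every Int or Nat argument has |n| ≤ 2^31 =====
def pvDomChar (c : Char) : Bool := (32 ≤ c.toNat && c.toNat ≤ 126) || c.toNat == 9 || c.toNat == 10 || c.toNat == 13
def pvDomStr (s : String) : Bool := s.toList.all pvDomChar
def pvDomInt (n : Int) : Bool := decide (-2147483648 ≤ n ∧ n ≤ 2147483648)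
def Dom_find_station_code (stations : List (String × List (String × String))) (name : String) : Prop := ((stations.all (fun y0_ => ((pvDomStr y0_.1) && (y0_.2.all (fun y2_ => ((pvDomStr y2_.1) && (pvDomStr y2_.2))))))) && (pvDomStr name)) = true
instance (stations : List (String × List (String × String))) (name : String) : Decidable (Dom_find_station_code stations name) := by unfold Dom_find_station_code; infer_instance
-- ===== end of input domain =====

-- B merges A's two sequential scans into one pass (exact match returns at once, first
-- substring match is kept as a candidate); objective: alternative single-pass decomposition.
-- Both programs raise KeyError at the same point; Pre_ excludes exactly those inputs.

-- ===== PORT A =====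
-- first loop of A: some (some c) = exact match found, some none = loop finished, none = KeyError
def fscExact (name : String) : List (String × List (String × String)) → Option (Option String)
  | [] => some none
  | (code, info) :: rest =>
    match (PySem.Dict.mk info).get? "name" with
    | none => none
    | some v => if v == name then some (some code) else fscExact name rest

-- second loop of A: same encoding, substring test
def fscSub (name : String) : List (String × List (String × String)) → Option (Option String)
  | [] => some none
  | (code, info) :: rest =>
    match (PySem.Dict.mk info).get? "name" with
    | none => none
    | some v => if PySem.Str.isIn name v then some (some code) else fscSub name rest

def find_station_code (stations : List (String × List (String × String))) (name : String) : Option String :=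
  match fscExact name stations with
  | none => none           -- KeyError (excluded by Pre_)
  | some (some code) => some code
  | some none =>
    match fscSub name stations with
    | none => none         -- KeyError (excluded by Pre_)
    | some r => r

-- ===== PORT B =====
-- single loop with a candidate accumulator; none on KeyError (excluded by Pre_)
def fscLoop (name : String) (candidate : Option String) : List (String × List (String × String)) → Option String
  | [] => candidate
  | (code, info) :: rest =>
    match (PySem.Dict.mk info).get? "name" with
    | none => none
    | some station_name =>
      if station_name == name then some code
      else if candidate == none && PySem.Str.isIn name station_name then
        fscLoop name (some code) rest
      else
        fscLoop name candidate rest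

def find_station_code_alt (stations : List (String × List (String × String))) (name : String) : Option String :=
  fscLoop name none stations

-- ===== PRECONDITION & SPEC =====
-- Pre_ excludes exactly the inputs on which Python A raises KeyError: an entry whose info
-- dict lacks the key "name" occurring before any exact name match.
def Pre_find_station_code (stations : List (String × List (String × String))) (name : String) : Prop :=
  ∀ p ∈ stations.takeWhile (fun p => (PySem.Dict.mk p.2).get? "name" ≠ some name),
    ((PySem.Dict.mk p.2).get? "name").isSome
instance (stations : List (String × List (String × String))) (name : String) : Decidable (Pre_find_station_code stations name) := by unfold Pre_find_station_code; infer_instance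
def pvWitness_find_station_code : (List (String × List (String × String))) × String :=
  ([("ST1", [("name", "Tokyo")]), ("ST2", [("name", "Shinjuku")])], "juku")

def Spec_find_station_code (stations : List (String × List (String × String))) (name : String) (out : Option String) : Prop := out = find_station_code_alt stations name
instance (stations : List (String × List (String × String))) (name : String) (out : Option String) : Decidable (Spec_find_station_code stations name out) := by unfold Spec_find_station_code; infer_instance

-- ===== CLAIM (what is proved, stated in full; the proofs are below) =====
def Claim_equal_find_station_code : Prop := ∀ (stations : List (String × List (String × String))) (name : String), Dom_find_station_code stations name → Pre_find_station_code stations name → Spec_find_station_code stations name (find_station_code stations name)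

-- ===== LEMMAS AND PROOFS =====

-- B's loop, with candidate `cand`, computes A's two-scan result with `cand` taking the place
-- of an earlier substring hit; holds unconditionally (both ports return none at a KeyError).
theorem fscLoop_eq (name : String) :
    ∀ (st : List (String × List (String × String))) (cand : Option String),
      fscLoop name cand st =
        match fscExact name st with
        | none => none
        | some (some c) => some c
        | some none =>
          match cand with
          | some x => some x
          | none => match fscSub name st with | none => none | some r => r := by
  intro st
  induction st with
  | nil => intro cand; cases cand <;> simp [fscLoop, fscExact, fscSub]
  | cons p rest ih =>
    intro cand
    obtain ⟨code, info⟩ := p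
    simp only [fscLoop, fscExact, fscSub]
    cases hget : (PySem.Dict.mk info).get? "name" with
    | none => rfl
    | some v =>
      by_cases hv : v == name
      · simp [hv]
      · simp only [hv, Bool.false_eq_true, if_false]
        by_cases hsub : PySem.Chars.isIn name.toList v.toList = true
        all_goals cases cand <;> simp [hsub, ih]

-- ===== VERDICT (by name: the statement is the Claim_ definition above) =====
theorem find_station_code_spec : Claim_equal_find_station_code := by
  intro stations name _ _
  unfold Spec_find_station_code find_station_code find_station_code_alt
  rw [fscLoop_eq]
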